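-- pv_equiv track=rewrite | github.com/Liuchanchung/cn-python-foundation | investigate texts and calls/ZH/Task4.py | seller_numbers
-- ===== SOURCE A (Python) =====
-- def seller_numbers(source):
--     sellers = set()   #建立集合
--     a_calls = set()   #接电话集合
--     for i in range(len(source)):
--         a_calls.add(source[i][1])
--         if source[i][0] not in a_calls:
--             sellers.add(source[i][0])
--     return sellers
-- ===== SOURCE B (Python) =====
-- def seller_numbers(source):
--     # First pass: index of the first record in which each number is a receiver.
--     first_receive = {}
--     for i, rec in enumerate(source):
--         r = rec[1]
--         if r not in first_receive:
--             first_receive[r] = i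
--     # Second pass: a caller is a seller iff it calls strictly before it ever receives.
--     result = set()
--     for i, rec in enumerate(source):
--         c = rec[0]
--         j = first_receive.get(c)
--         if j is None or i < j:
--             result.add(c)
--     return result
-- ===== Notes on version B (the rewrite author's own statement) =====
-- stated objective: alternative
-- what changed: B replaces A's single incremental scan (grow a receivers-set, test each caller against it) by two passes: first a dictionary mapping each number to the index of the first record where it receives a call, then an index-filter pass adding caller i exactly when i precedes its first-receive index.
import Mathlib
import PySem

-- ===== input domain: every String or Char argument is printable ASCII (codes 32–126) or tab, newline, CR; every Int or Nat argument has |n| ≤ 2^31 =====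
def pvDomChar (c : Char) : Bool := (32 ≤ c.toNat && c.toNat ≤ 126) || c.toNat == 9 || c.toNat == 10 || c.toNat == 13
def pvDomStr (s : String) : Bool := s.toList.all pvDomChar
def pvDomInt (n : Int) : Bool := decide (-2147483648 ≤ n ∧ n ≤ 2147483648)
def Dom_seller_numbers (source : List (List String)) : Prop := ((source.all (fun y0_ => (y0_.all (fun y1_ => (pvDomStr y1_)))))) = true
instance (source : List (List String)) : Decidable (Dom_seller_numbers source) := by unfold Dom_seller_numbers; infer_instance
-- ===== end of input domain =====

-- B replaces A's incremental add-receiver-then-test scan by a precomputed first-receive index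
-- table plus a second index-filter pass (alternative decomposition, same asymptotic cost).

-- ===== PORT A =====
-- loop body of A's 'for i in range(len(source))', acting on source[i]; st = (sellers, a_calls)
def pvStepA (st : List String × List String) (row : List String) : List String × List String :=
  let a_calls := PySem.Set.add st.2 (PySem.List.pyGetD row 1 "")
  if PySem.Set.contains a_calls (PySem.List.pyGetD row 0 "") then (st.1, a_calls)
  else (PySem.Set.add st.1 (PySem.List.pyGetD row 0 ""), a_calls)

def seller_numbers (source : List (List String)) : List String :=
  ((PySem.List.pyRange 0 (source.length : Int) 1).foldl
      (fun st i => pvStepA st (PySem.List.pyGetD source i [])) (([], []) : List String × List String)).1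

-- ===== PORT B =====
-- first pass: 'if rec[1] not in first_receive: first_receive[rec[1]] = i'
def pvFrStep (d : PySem.Dict String Int) (p : Int × List String) : PySem.Dict String Int :=
  if d.contains (PySem.List.pyGetD p.2 1 "") then d
  else d.insert (PySem.List.pyGetD p.2 1 "") p.1

-- second pass: 'j = first_receive.get(rec[0]); if j is None or i < j: result.add(rec[0])'
def pvStepB (fr : PySem.Dict String Int) (s : List String) (p : Int × List String) : List String :=
  match fr.get? (PySem.List.pyGetD p.2 0 "") with
  | none => PySem.Set.add s (PySem.List.pyGetD p.2 0 "")
  | some j => if p.1 < j then PySem.Set.add s (PySem.List.pyGetD p.2 0 "") else s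

def seller_numbers_alt (source : List (List String)) : List String :=
  let fr := (PySem.List.enumerate source 0).foldl pvFrStep PySem.Dict.empty
  (PySem.List.enumerate source 0).foldl (pvStepB fr) ([] : List String)

-- ===== PRECONDITION & SPEC =====
-- Python A raises IndexError on any record shorter than 2 entries; Pre_ excludes exactly those.
def Pre_seller_numbers (source : List (List String)) : Prop :=
  ∀ row ∈ source, 2 ≤ row.length
instance (source : List (List String)) : Decidable (Pre_seller_numbers source) := by
  unfold Pre_seller_numbers; infer_instance

def pvWitness_seller_numbers : List (List String) :=
  [["138", "208"], ["208", "138"], ["333", "208"]]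

def Spec_seller_numbers (source : List (List String)) (out : List String) : Prop :=
  out = seller_numbers_alt source
instance (source : List (List String)) (out : List String) : Decidable (Spec_seller_numbers source out) := by
  unfold Spec_seller_numbers; infer_instance

-- ===== CLAIM (what is proved, stated in full; the proofs are below) =====
def Claim_equal_seller_numbers : Prop := ∀ (source : List (List String)), Dom_seller_numbers source → Pre_seller_numbers source → Spec_seller_numbers source (seller_numbers source)

-- ===== LEMMAS AND PROOFS =====

-- receiver field of a record, as both ports read it
def pvRecv (row : List String) : String := PySem.List.pyGetD row 1 ""

-- the first-receive dictionary maps c to (start + first index of c among the receivers), if any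
theorem pvFr_get (rows : List (List String)) (k : Int) (d : PySem.Dict String Int) (c : String) :
    ((PySem.List.enumerate rows k).foldl pvFrStep d).get? c =
      match d.get? c with
      | some v => some v
      | none => (PySem.List.index? (rows.map pvRecv) c).map (fun j => k + (j : Int)) := by
  induction rows generalizing k d with
  | nil =>
      rw [PySem.List.enumerate_nil, List.foldl_nil]
      cases hdc : d.get? c <;> simp [PySem.List.index?]
  | cons row rows ih =>
      rw [PySem.List.enumerate_cons, List.foldl_cons, ih]
      by_cases hc : c = pvRecv row
      · subst hc
        by_cases hcont : d.contains (PySem.List.pyGetD row 1 "") = true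
        · have : ∃ v, d.get? (pvRecv row) = some v := by
            rw [Option.isSome_iff_exists.symm, ← PySem.Dict.contains_eq_isSome_get?]
            exact hcont
          obtain ⟨v, hv⟩ := this
          have hstep : pvFrStep d (k, row) = d := by unfold pvFrStep; simp [hcont]
          rw [hstep, hv]
        · have hnone : d.get? (pvRecv row) = none := by
            rw [PySem.Dict.get?_eq_none_iff_contains]
            simpa [pvRecv] using hcont
          have hstep : pvFrStep d (k, row) = d.insert (pvRecv row) k := by
            unfold pvFrStep; simp [hcont, pvRecv]
          rw [hstep, PySem.Dict.get?_insert_self, hnone, List.map_cons,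
            PySem.List.index?_cons_self]
          simp
      · have hget : (pvFrStep d (k, row)).get? c = d.get? c := by
          unfold pvFrStep
          split
          · rfl
          · exact PySem.Dict.get?_insert_of_ne _ _ (by simpa [pvRecv] using hc)
        rw [hget]
        cases hdc : d.get? c
        · simp only [List.map_cons,
            PySem.List.index?_cons_of_ne (rows.map pvRecv) (show pvRecv row ≠ c by simpa [eq_comm] using hc)]
          cases PySem.List.index? (rows.map pvRecv) c
          · simp
          · simp
            ring
        · rfl

-- B's second-pass step, with the dictionary built from the FULL list, decides exactly
-- membership of the caller among the receivers of the inclusive prefix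
theorem pvStepB_eq (P rest : List (List String)) (row : List String) (s : List String) :
    pvStepB ((PySem.List.enumerate (P ++ row :: rest) 0).foldl pvFrStep PySem.Dict.empty) s
        ((P.length : Int), row) =
      if (PySem.List.pyGetD row 0 "") ∈ (P ++ [row]).map pvRecv then s
      else PySem.Set.add s (PySem.List.pyGetD row 0 "") := by
  have hfull : (P ++ row :: rest).map pvRecv = (P ++ [row]).map pvRecv ++ rest.map pvRecv := by
    simp
  have hfr := pvFr_get (P ++ row :: rest) 0 PySem.Dict.empty (PySem.List.pyGetD row 0 "")
  rw [PySem.Dict.get?_empty] at hfr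
  unfold pvStepB
  simp only [hfr, hfull]
  by_cases hmem : (PySem.List.pyGetD row 0 "") ∈ (P ++ [row]).map pvRecv
  · rw [if_pos hmem, PySem.List.index?_append_of_mem _ hmem]
    obtain ⟨j, hj⟩ := Option.isSome_iff_exists.mp ((PySem.List.index?_isSome_iff _ _).mpr hmem)
    obtain ⟨pre, suf, heq, hlen, -⟩ := (PySem.List.index?_eq_some_iff _ _ _).mp hj
    have hjlt : j < P.length + 1 := by
      subst hlen
      have := congrArg List.length heq
      simp at this
      omega
    rw [hj]
    show (if (P.length : Int) < 0 + (j : Int) then PySem.Set.add s (PySem.List.pyGetD row 0 "") else s) = s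
    rw [if_neg (by omega)]
  · rw [if_neg hmem]
    cases hix : PySem.List.index? ((P ++ [row]).map pvRecv ++ rest.map pvRecv) (PySem.List.pyGetD row 0 "") with
    | none => rfl
    | some j =>
        obtain ⟨hjl, hget, -⟩ := PySem.List.getElem_of_index?_eq_some hix
        have hgt : P.length < j := by
          by_contra hle
          apply hmem
          have hjpre : j < ((P ++ [row]).map pvRecv).length := by
            simp only [List.length_map, List.length_append, List.length_singleton]
            omega
          rw [List.getElem_append_left hjpre] at hget
          exact hget ▸ List.getElem_mem hjpre
        show (if (P.length : Int) < 0 + (j : Int) then PySem.Set.add s (PySem.List.pyGetD row 0 "") else s)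
          = PySem.Set.add s (PySem.List.pyGetD row 0 "")
        rw [if_pos (by omega)]

-- one step of A adds receivers-of-prefix membership of the caller, in if-form
theorem pvStepA_eq (P : List (List String)) (row : List String) (s : List String) :
    pvStepA (s, PySem.Set.ofList (P.map pvRecv)) row =
      ((if (PySem.List.pyGetD row 0 "") ∈ (P ++ [row]).map pvRecv then s
        else PySem.Set.add s (PySem.List.pyGetD row 0 "")),
       PySem.Set.ofList ((P ++ [row]).map pvRecv)) := by
  have hmap : (P ++ [row]).map pvRecv = P.map pvRecv ++ [pvRecv row] := by simp
  have hcalls : PySem.Set.add (PySem.Set.ofList (P.map pvRecv)) (PySem.List.pyGetD row 1 "") =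
      PySem.Set.ofList ((P ++ [row]).map pvRecv) := by
    rw [hmap, PySem.Set.ofList_append_singleton]
    rfl
  unfold pvStepA
  dsimp only
  simp only [hcalls]
  split_ifs with h1 h2 h2
  · rfl
  · exact absurd (by simpa [PySem.Set.mem_ofList] using (PySem.Set.contains_iff _ _).mp h1) h2
  · exact absurd ((PySem.Set.contains_iff _ _).mpr (by simpa [PySem.Set.mem_ofList] using h2)) h1
  · rfl

-- main invariant: A's remaining fold from state (s, receivers-of-P) equals B's remaining
-- second-pass fold starting at index |P|
theorem pvMain (rest P : List (List String)) (s : List String) :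
    (rest.foldl pvStepA (s, PySem.Set.ofList (P.map pvRecv))).1 =
      (PySem.List.enumerate rest (P.length : Int)).foldl
        (pvStepB ((PySem.List.enumerate (P ++ rest) 0).foldl pvFrStep PySem.Dict.empty)) s := by
  induction rest generalizing P s with
  | nil => rw [PySem.List.enumerate_nil]; rfl
  | cons row rest ih =>
      rw [List.foldl_cons, pvStepA_eq, PySem.List.enumerate_cons]
      rw [List.foldl_cons, pvStepB_eq]
      have hP : (P ++ [row]) ++ rest = P ++ row :: rest := by simp
      have hlen : (((P ++ [row]).length : Nat) : Int) = (P.length : Int) + 1 := by simp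
      have := ih (P ++ [row])
        (if (PySem.List.pyGetD row 0 "") ∈ (P ++ [row]).map pvRecv then s
         else PySem.Set.add s (PySem.List.pyGetD row 0 ""))
      rw [hP, hlen] at this
      exact this

-- ===== VERDICT (by name: the statement is the Claim_ definition above) =====
theorem seller_numbers_spec : Claim_equal_seller_numbers := by
  intro source _ _
  unfold Spec_seller_numbers seller_numbers seller_numbers_alt
  rw [PySem.List.foldl_pyRange_zero_pyGetD' source [] pvStepA (([], []) : List String × List String)]
  have h := pvMain source [] []
  simpa using h
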